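-- pv_equiv track=rewrite | github.com/clnakagawa/ntm-analysis | getTest.py | ctgaps
-- ===== SOURCE A (Python) =====
-- def ctgaps(seq):
--     ct = 0
--     current = False
--     for c in seq:
--         if c == '-':
--             if not current:
--                 ct += 1
--                 current = True
--         else:
--             if current:
--                 current = False
--     return ct
-- ===== SOURCE B (Python) =====
-- def ctgaps(seq):
--     # number of maximal '-' runs = (# of '-') - (# of adjacent ('-','-') pairs),
--     # since every dash except a run's first one is preceded by a dash.
--     s = list(seq)
--     dashes = sum(1 for c in s if c == '-')
--     doubles = sum(1 for a, b in zip(s, s[1:]) if a == '-' and b == '-')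
--     return dashes - doubles
-- ===== Notes on version B (the rewrite author's own statement) =====
-- stated objective: alternative
-- what changed: Replaces A's boolean state-machine scan with the arithmetic identity runs = (# of '-') - (# of adjacent '-','-' pairs), computed by two stateless counting passes (element count plus a zip over consecutive pairs).
import Mathlib
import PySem

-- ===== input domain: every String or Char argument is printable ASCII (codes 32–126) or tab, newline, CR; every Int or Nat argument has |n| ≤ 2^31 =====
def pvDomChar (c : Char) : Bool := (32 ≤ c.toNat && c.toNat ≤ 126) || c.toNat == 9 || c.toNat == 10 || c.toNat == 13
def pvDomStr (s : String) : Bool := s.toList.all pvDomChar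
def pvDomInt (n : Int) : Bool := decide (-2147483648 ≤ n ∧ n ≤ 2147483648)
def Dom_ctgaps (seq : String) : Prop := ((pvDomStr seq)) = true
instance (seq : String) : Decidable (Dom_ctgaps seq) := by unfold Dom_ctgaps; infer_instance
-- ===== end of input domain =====

-- B replaces A's boolean state-machine scan with the identity runs = #dashes - #adjacent dash pairs; objective: alternative.

-- ===== PORT A =====
-- one step of A's for-loop body on the state (ct, current)
def ctgapsStep (st : Int × Bool) (c : Char) : Int × Bool :=
  if c = '-' then
    if !st.2 then (st.1 + 1, true) else st
  else
    if st.2 then (st.1, false) else st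

def ctgaps (seq : String) : Int :=
  (seq.toList.foldl ctgapsStep (0, false)).1

-- ===== PORT B =====
def ctgaps_alt (seq : String) : Int :=
  let s := seq.toList
  let dashes : Int := (s.filter (fun c => c = '-')).length
  let doubles : Int := ((s.zip s.tail).filter (fun p => p.1 = '-' ∧ p.2 = '-')).length
  dashes - doubles

-- ===== PRECONDITION & SPEC =====
def Spec_ctgaps (seq : String) (out : Int) : Prop := out = ctgaps_alt seq
instance (seq : String) (out : Int) : Decidable (Spec_ctgaps seq out) := by unfold Spec_ctgaps; infer_instance

-- ===== CLAIM (what is proved, stated in full; the proofs are below) =====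
def Claim_equal_ctgaps : Prop := ∀ (seq : String), Dom_ctgaps seq → Spec_ctgaps seq (ctgaps seq)

-- ===== LEMMAS AND PROOFS =====

-- recursive characterisation of B's 'doubles' count
def pairsR : List Char → Int
  | a :: b :: rest => (if a = '-' ∧ b = '-' then 1 else 0) + pairsR (b :: rest)
  | _ => 0

theorem zip_pairs (l : List Char) :
    (((l.zip l.tail).filter (fun p => p.1 = '-' ∧ p.2 = '-')).length : Int) = pairsR l := by
  induction l with
  | nil => simp [pairsR]
  | cons a t ih =>
    cases t with
    | nil => simp [pairsR]
    | cons b rest =>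
      simp only [List.tail_cons, List.zip_cons_cons, List.filter_cons] at ih ⊢
      by_cases h : a = '-' ∧ b = '-'
      · obtain ⟨ha, hb⟩ := h
        subst ha; subst hb
        simp only [and_self, decide_true, if_true, List.length_cons, pairsR, ← ih]
        push_cast; ring
      · simp [h, pairsR, ← ih, Bool.decide_and]

def dashesI (l : List Char) : Int := ((l.filter (fun c => c = '-')).length : Int)

theorem foldl_ctgapsStep (l : List Char) (ct : Int) (cur : Bool) :
    (l.foldl ctgapsStep (ct, cur)).1 =
      ct + dashesI l - pairsR l - (if cur = true ∧ l.head? = some '-' then 1 else 0) := by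
  induction l generalizing ct cur with
  | nil => simp [dashesI, pairsR]
  | cons c rest ih =>
    simp only [List.foldl_cons, ctgapsStep]
    have hd : dashesI (c :: rest) = (if c = '-' then 1 else 0) + dashesI rest := by
      by_cases hc : c = '-' <;> simp [dashesI, hc] <;> push_cast <;> ring
    have hp : pairsR (c :: rest) =
        (if c = '-' ∧ rest.head? = some '-' then 1 else 0) + pairsR rest := by
      cases rest with
      | nil => simp [pairsR]
      | cons b r =>
        by_cases h : c = '-' ∧ b = '-' <;> simp [pairsR, h]
    rw [hd, hp]
    by_cases hc : c = '-' <;> cases cur <;>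
      simp [hc, ih] <;>
      by_cases hr : rest.head? = some '-' <;> simp [hr] <;> ring

-- ===== VERDICT (by name: the statement is the Claim_ definition above) =====
theorem ctgaps_spec : Claim_equal_ctgaps := by
  intro seq _
  show ctgaps seq = ctgaps_alt seq
  rw [ctgaps, ctgaps_alt, foldl_ctgapsStep, zip_pairs]
  simp [dashesI]
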